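-- pv_equiv track=rewrite | github.com/ArthBorges/Python | AVA - Exercícios/1004-02.py | subnumeros
-- ===== SOURCE A (Python) =====
-- def subnumeros(n):
--     subnum = 0
--     i = 1
--     while n > 0:
--         num = n % 10
--         if num % 2 == 0:
--             subnum += num * i
--             i *= 10
--         n //= 10
--     return subnum
-- ===== SOURCE B (Python) =====
-- def subnumeros(n):
--     # Recursive: even-digit concatenation of the truncated number, then append the last digit if even.
--     if n <= 0:
--         return 0
--     rest = subnumeros(n // 10)
--     d = n % 10
--     return rest * 10 + d if d % 2 == 0 else rest
-- ===== Notes on version B (the rewrite author's own statement) =====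
-- stated objective: simpler
-- what changed: Replaces the iterative least-significant-digit loop that maintains a growing place-value multiplier with a short structural recursion on the number with its last digit removed, appending each even trailing digit by shift-and-add, eliminating the multiplier accumulator entirely.
import Mathlib
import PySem

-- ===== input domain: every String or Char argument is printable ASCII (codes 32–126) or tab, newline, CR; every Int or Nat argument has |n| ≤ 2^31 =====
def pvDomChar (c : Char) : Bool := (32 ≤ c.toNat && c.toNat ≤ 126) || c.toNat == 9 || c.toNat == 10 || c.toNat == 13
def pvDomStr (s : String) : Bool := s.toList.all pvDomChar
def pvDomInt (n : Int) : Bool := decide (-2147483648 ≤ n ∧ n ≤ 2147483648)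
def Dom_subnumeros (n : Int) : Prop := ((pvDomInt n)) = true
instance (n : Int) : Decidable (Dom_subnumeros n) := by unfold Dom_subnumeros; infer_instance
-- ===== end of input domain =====

-- B replaces A's iterative LSB digit loop with placement multiplier i by a structural
-- recursion on the digit-truncated number appending each even trailing digit by shift-and-add (objective: simpler).


-- termination helper for both recursions: n // 10 shrinks for n > 0
theorem pvFloordivTen_lt (n : Int) (h : 0 < n) :
    (PySem.Int.floordiv n 10).toNat < n.toNat := by
  rw [PySem.Int.floordiv_eq_ediv_of_pos (by omega)]
  omega

-- ===== PORT A =====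
-- the 'while n > 0' loop of A, state (n, subnum, i)
def subnumerosLoop (n subnum i : Int) : Int :=
  if h : 0 < n then
    let num := PySem.Int.mod n 10
    if PySem.Int.mod num 2 = 0 then
      subnumerosLoop (PySem.Int.floordiv n 10) (subnum + num * i) (i * 10)
    else
      subnumerosLoop (PySem.Int.floordiv n 10) subnum i
  else subnum
termination_by n.toNat
decreasing_by all_goals exact pvFloordivTen_lt n h

def subnumeros (n : Int) : Int := subnumerosLoop n 0 1

-- ===== PORT B =====
def subnumeros_alt (n : Int) : Int :=
  if h : n ≤ 0 then 0
  else
    let rest := subnumeros_alt (PySem.Int.floordiv n 10)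
    let d := PySem.Int.mod n 10
    if PySem.Int.mod d 2 = 0 then rest * 10 + d else rest
termination_by n.toNat
decreasing_by exact pvFloordivTen_lt n (by omega)

-- ===== PRECONDITION & SPEC =====
def Spec_subnumeros (n : Int) (out : Int) : Prop := out = subnumeros_alt n
instance (n : Int) (out : Int) : Decidable (Spec_subnumeros n out) := by unfold Spec_subnumeros; infer_instance

-- ===== CLAIM (what is proved, stated in full; the proofs are below) =====
def Claim_equal_subnumeros : Prop := ∀ (n : Int), Dom_subnumeros n → Spec_subnumeros n (subnumeros n)

-- ===== LEMMAS AND PROOFS =====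

-- loop invariant: A's loop from state (n, s, i) returns s + i * (B's value on n)
theorem subnumerosLoop_eq_aux : ∀ (k : Nat) (n : Int), n.toNat = k → ∀ (s i : Int),
    subnumerosLoop n s i = s + i * subnumeros_alt n := by
  intro k
  induction k using Nat.strong_induction_on with
  | _ k ih =>
    intro n hk s i
    rw [subnumerosLoop, subnumeros_alt]
    by_cases h : 0 < n
    · have hrec := ih (PySem.Int.floordiv n 10).toNat (hk ▸ pvFloordivTen_lt n h)
        (PySem.Int.floordiv n 10) rfl
      simp only [h, dite_true, show ¬ n ≤ 0 by omega, dite_false]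
      split_ifs with hpar
      · rw [hrec]; ring
      · rw [hrec]
    · simp only [h, dite_false, show n ≤ 0 by omega, dite_true, mul_zero, add_zero]

theorem subnumerosLoop_eq (n : Int) : ∀ (s i : Int),
    subnumerosLoop n s i = s + i * subnumeros_alt n :=
  subnumerosLoop_eq_aux n.toNat n rfl

-- ===== VERDICT (by name: the statement is the Claim_ definition above) =====
theorem subnumeros_spec : Claim_equal_subnumeros := by
  intro n _
  unfold Spec_subnumeros subnumeros
  rw [subnumerosLoop_eq]
  ring
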